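-- pv_equiv track=rewrite | github.com/yonsweng/ps | codeforces/1594/d.py | dfs
-- ===== SOURCE A (Python) =====
-- def dfs(prev, i, toggle, visited, adj, groups):
--     visited[i] = True
--     all_sum, odd_sum = len(groups[i]), toggle * len(groups[i])
--
--     for j in adj[i]:
--         if j != prev and not visited[j]:
--             all_cnt, odd_cnt = dfs(i, j, 1 - toggle, visited, adj, groups)
--             all_sum += all_cnt
--             odd_sum += odd_cnt
--
--     return all_sum, odd_sum
-- ===== SOURCE B (Python) =====
-- def dfs(prev, i, toggle, visited, adj, groups):
--     # Iterative DFS with an explicit stack of frames (prev, node, toggle,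
--     # remaining neighbours, all_sum, odd_sum); a finished frame's totals are
--     # added into its parent's accumulators.  Mutates visited like the original.
--     visited[i] = True
--     b = len(groups[i])
--     # remaining neighbours are kept reversed so .pop() yields them in order
--     stack = [(prev, i, toggle, list(reversed(adj[i])), b, toggle * b)]
--     while True:
--         p, node, t, js, a, o = stack.pop()
--         if js:
--             j = js.pop()
--             stack.append((p, node, t, js, a, o))
--             if j != p and not visited[j]:
--                 visited[j] = True
--                 m = len(groups[j])
--                 stack.append((node, j, 1 - t, list(reversed(adj[j])), m, (1 - t) * m))
--         else:
--             if not stack: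
--                 return (a, o)
--             pp, pn, pt, pjs, pa, po = stack.pop()
--             stack.append((pp, pn, pt, pjs, pa + a, po + o))
-- ===== Notes on version B (the rewrite author's own statement) =====
-- stated objective: alternative
-- what changed: Recursive DFS replaced by an iterative DFS over an explicit stack of frames (prev, node, toggle, remaining neighbours, all_sum, odd_sum) with post-order child-to-parent accumulation, so no Python recursion (and no RecursionError on deep trees).
-- outside the precondition, e.g. on dfs(0, 0, 1, [False], [[]], [[], [3]]): A returns (0, 0), B returns (0, 0); on dfs(0, 0, 1, [False, False], [[0]], [[1], [2]]): A returns (1, 1), B returns (1, 1)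
import Mathlib
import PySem

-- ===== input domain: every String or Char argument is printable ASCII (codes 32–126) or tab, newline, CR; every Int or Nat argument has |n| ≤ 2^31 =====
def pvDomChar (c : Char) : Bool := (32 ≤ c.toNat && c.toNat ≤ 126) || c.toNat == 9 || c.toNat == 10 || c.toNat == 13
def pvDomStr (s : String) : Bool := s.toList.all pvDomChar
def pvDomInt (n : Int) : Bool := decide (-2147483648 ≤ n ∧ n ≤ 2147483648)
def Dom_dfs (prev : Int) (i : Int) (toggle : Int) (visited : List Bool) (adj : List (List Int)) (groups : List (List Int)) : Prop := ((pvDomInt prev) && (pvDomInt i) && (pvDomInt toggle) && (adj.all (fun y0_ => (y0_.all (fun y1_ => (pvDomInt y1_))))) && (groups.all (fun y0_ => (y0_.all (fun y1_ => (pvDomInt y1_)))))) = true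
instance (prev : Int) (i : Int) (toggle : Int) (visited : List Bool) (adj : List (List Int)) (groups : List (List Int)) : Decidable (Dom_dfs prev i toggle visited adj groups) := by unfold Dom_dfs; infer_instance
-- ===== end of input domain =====

-- B replaces A's recursive DFS by an iterative DFS over an explicit stack of frames with
-- post-order child-to-parent accumulation (objective: alternative decomposition, no Python
-- recursion).  Both Pythons mutate `visited` in place identically; the equivalence proved
-- here is about the RETURN VALUE.

-- ===== PORT A =====
-- Literal port of A's recursive dfs.  `visited[i] = True` is pySetD (wrap-aware; exact where
-- Python succeeds), `visited[j]` / `adj[i]` / `groups[i]` are pyGet? (none = IndexError,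
-- excluded by Pre_; the port skips/defaults there as a totality guard).  The recursion is
-- guarded by fuel `visited.length + 2`, which is never exhausted (each recursive call marks a
-- fresh False in `visited`).
def dfsA (adj groups : List (List Int)) : Nat → Int → Int → Int → List Bool → List Bool × Int × Int
  | 0, _, _, _, vis => (vis, 0, 0)
  | f + 1, prev, i, t, vis =>
    let vis1 := PySem.List.pySetD vis i true
    let b : Int := ((PySem.List.pyGet? groups i).getD []).length
    ((PySem.List.pyGet? adj i).getD []).foldl
      (fun st j =>
        if j ≠ prev ∧ PySem.List.pyGet? st.1 j = some false then
          let r := dfsA adj groups f i j (1 - t) st.1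
          (r.1, st.2.1 + r.2.1, st.2.2 + r.2.2)
        else st)
      (vis1, b, t * b)

def dfs (prev : Int) (i : Int) (toggle : Int) (visited : List Bool) (adj : List (List Int)) (groups : List (List Int)) : Int × Int :=
  let r := dfsA adj groups (visited.length + 2) prev i toggle visited
  (r.2.1, r.2.2)

-- ===== PORT B =====
-- (termination helpers for runB; Source B's while-loop terminates because each step either marks
-- a fresh False in `visited` or shrinks the stack weight)
theorem pv_countFalse_pySetD_lt (vis : List Bool) (j : Int)
    (h : PySem.List.pyGet? vis j = some false) :
    (PySem.List.pySetD vis j true).count false < vis.count false := by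
  simp only [PySem.List.pyGet?, Option.bind_eq_some_iff] at h
  obtain ⟨k, hk, hv⟩ := h
  have hset : PySem.List.pySetD vis j true = vis.set k true := by
    simp [PySem.List.pySetD, PySem.List.pySet?, hk]
  rw [hset]
  have : (vis.set k true).count false + 1 = vis.count false := by
    clear hset hk
    induction vis generalizing k with
    | nil => simp at hv
    | cons x xs ih =>
      cases k with
      | zero => simp at hv; simp [hv]
      | succ k =>
        simp only [List.getElem?_cons_succ] at hv
        simp only [List.set_cons_succ, List.count_cons]
        have := ih k hv
        omega
  omega

-- Port of Source B's while-loop.  A frame (p, node, t, js, a, o) carries the remaining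
-- neighbours js (Source B keeps that list reversed so .pop() is O(1); the port keeps the same
-- sequence in forward order and consumes the head — the identical sequence of j's).
def runB (adj groups : List (List Int)) (vis : List Bool)
    (stack : List (Int × Int × Int × List Int × Int × Int)) : Int × Int :=
  match stack with
  | [] => (0, 0)  -- unreachable: Source B's stack is never empty at the loop head
  | (p, node, t, js, a, o) :: S =>
    match js with
    | j :: rest =>
      if h : j ≠ p ∧ PySem.List.pyGet? vis j = some false then
        let m : Int := ((PySem.List.pyGet? groups j).getD []).length
        runB adj groups (PySem.List.pySetD vis j true)
          ((node, j, 1 - t, (PySem.List.pyGet? adj j).getD [], m, (1 - t) * m)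
            :: (p, node, t, rest, a, o) :: S)
      else
        runB adj groups vis ((p, node, t, rest, a, o) :: S)
    | [] =>
      match S with
      | [] => (a, o)
      | (pp, pn, pt, pjs, pa, po) :: S' =>
        runB adj groups vis ((pp, pn, pt, pjs, pa + a, po + o) :: S')
  termination_by (vis.count false, stack.foldr (fun fr acc => fr.2.2.2.1.length + 1 + acc) 0)
  decreasing_by
  · exact Prod.Lex.left _ _ (pv_countFalse_pySetD_lt vis j h.2)
  · apply Prod.Lex.right
    simp only [List.foldr, List.length_cons]
    omega
  · apply Prod.Lex.right
    simp only [List.foldr]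
    omega

def dfs_alt (prev : Int) (i : Int) (toggle : Int) (visited : List Bool) (adj : List (List Int)) (groups : List (List Int)) : Int × Int :=
  let vis1 := PySem.List.pySetD visited i true
  let b : Int := ((PySem.List.pyGet? groups i).getD []).length
  runB adj groups vis1 [(prev, i, toggle, (PySem.List.pyGet? adj i).getD [], b, toggle * b)]

-- ===== PRECONDITION & SPEC =====
-- Pre_ excludes the inputs on which Python A raises IndexError: lists of equal length n,
-- a valid (wrap-allowed) start index, and a valid index for every adjacency entry of every
-- vertex that could be traversed (in the closure from the start through initially-unvisited
-- vertices, where the root's edges equal to `prev` are skipped, as A skips them).  It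
-- conservatively also excludes some inputs A returns on — ragged lists whose invalid part is
-- never indexed (see cites; A and B agree there too).
def pvRoot (visited : List Bool) (i : Int) : Nat := (PySem.List.pyIdx? visited.length i).getD 0

def pvSuccs (prev : Int) (root : Nat) (visited : List Bool) (adj : List (List Int)) (k : Nat) : List Nat :=
  if k = root ∨ visited.getD k true = false then
    (adj.getD k []).filterMap
      (fun j => if k = root ∧ j = prev then none else PySem.List.pyIdx? visited.length j)
  else []

def pvReachAux (prev : Int) (root : Nat) (visited : List Bool) (adj : List (List Int)) : Nat → List Nat → List Nat
  | 0, R => R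
  | m + 1, R => pvReachAux prev root visited adj m ((R ++ R.flatMap (pvSuccs prev root visited adj)).dedup)

def pvReach (prev : Int) (i : Int) (visited : List Bool) (adj : List (List Int)) : List Nat :=
  pvReachAux prev (pvRoot visited i) visited adj (visited.length + 1) [pvRoot visited i]

def Pre_dfs (prev : Int) (i : Int) (toggle : Int) (visited : List Bool) (adj : List (List Int)) (groups : List (List Int)) : Prop :=
  adj.length = visited.length ∧ groups.length = visited.length ∧
  PySem.Raise.InRange visited.length i ∧
  ∀ k ∈ pvReach prev i visited adj,
    (k = pvRoot visited i ∨ visited.getD k true = false) →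
    ∀ j ∈ adj.getD k [],
      (k = pvRoot visited i ∧ j = prev) ∨ PySem.Raise.InRange visited.length j
instance (prev : Int) (i : Int) (toggle : Int) (visited : List Bool) (adj : List (List Int)) (groups : List (List Int)) : Decidable (Pre_dfs prev i toggle visited adj groups) := by unfold Pre_dfs; infer_instance

def pvWitness_dfs : Int × Int × Int × List Bool × List (List Int) × List (List Int) :=
  (0, 0, 0, [false], [[0]], [[1, 2]])

def Spec_dfs (prev : Int) (i : Int) (toggle : Int) (visited : List Bool) (adj : List (List Int)) (groups : List (List Int)) (out : Int × Int) : Prop := out = dfs_alt prev i toggle visited adj groups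
instance (prev : Int) (i : Int) (toggle : Int) (visited : List Bool) (adj : List (List Int)) (groups : List (List Int)) (out : Int × Int) : Decidable (Spec_dfs prev i toggle visited adj groups out) := by unfold Spec_dfs; infer_instance

-- ===== CLAIM (what is proved, stated in full; the proofs are below) =====
def Claim_equal_dfs : Prop := ∀ (prev : Int) (i : Int) (toggle : Int) (visited : List Bool) (adj : List (List Int)) (groups : List (List Int)), Dom_dfs prev i toggle visited adj groups → Pre_dfs prev i toggle visited adj groups → Spec_dfs prev i toggle visited adj groups (dfs prev i toggle visited adj groups)

-- ===== LEMMAS AND PROOFS =====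

-- The body of A's neighbour loop, with the child-call fuel g made explicit.
def pvBody (adj groups : List (List Int)) (g : Nat) (prev i t : Int) :
    (List Bool × Int × Int) → Int → (List Bool × Int × Int) :=
  fun st j =>
    if j ≠ prev ∧ PySem.List.pyGet? st.1 j = some false then
      let r := dfsA adj groups g i j (1 - t) st.1
      (r.1, st.2.1 + r.2.1, st.2.2 + r.2.2)
    else st

theorem dfsA_succ (adj groups : List (List Int)) (g : Nat) (prev i t : Int) (vis : List Bool) :
    dfsA adj groups (g + 1) prev i t vis =
      ((PySem.List.pyGet? adj i).getD []).foldl (pvBody adj groups g prev i t)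
        (PySem.List.pySetD vis i true,
         (((PySem.List.pyGet? groups i).getD []).length : Int),
         t * (((PySem.List.pyGet? groups i).getD []).length : Int)) := rfl

-- "Finishing" a frame: its totals are folded into the parent frame (or returned).
def pvFinish (adj groups : List (List Int)) (vis : List Bool) (a o : Int) :
    List (Int × Int × Int × List Int × Int × Int) → Int × Int
  | [] => (a, o)
  | (pp, pn, pt, pjs, pa, po) :: S => runB adj groups vis ((pp, pn, pt, pjs, pa + a, po + o) :: S)

theorem pv_countFalse_pySetD_le (vis : List Bool) (j : Int) :
    (PySem.List.pySetD vis j true).count false ≤ vis.count false := by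
  simp only [PySem.List.pySetD, PySem.List.pySet?]
  cases hk : PySem.List.pyIdx? vis.length j with
  | none => simp
  | some k =>
    simp only [Option.map_some, Option.getD_some]
    clear hk
    induction vis generalizing k with
    | nil => simp
    | cons x xs ih =>
      cases k with
      | zero => simp [List.count_cons]
      | succ k => simp only [List.set_cons_succ, List.count_cons]; have := ih k; omega

theorem pv_one_le_countFalse (vis : List Bool) (j : Int)
    (h : PySem.List.pyGet? vis j = some false) : 1 ≤ vis.count false := by
  simp only [PySem.List.pyGet?, Option.bind_eq_some_iff] at h
  obtain ⟨k, _, hv⟩ := h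
  have : false ∈ vis := by
    have := List.getElem?_eq_some_iff.mp hv
    obtain ⟨hk, he⟩ := this
    exact he ▸ List.getElem_mem hk
  exact List.count_pos_iff.mpr this

-- dfsA only turns entries of `visited` to True: the number of False entries never grows.
theorem dfsA_count_le (adj groups : List (List Int)) :
    ∀ (g : Nat) (prev i t : Int) (vis : List Bool),
      (dfsA adj groups g prev i t vis).1.count false ≤ vis.count false := by
  intro g
  induction g with
  | zero => intro prev i t vis; simp [dfsA]
  | succ g ih =>
    intro prev i t vis
    rw [dfsA_succ]
    have haux : ∀ (js : List Int) (st : List Bool × Int × Int),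
        ((js.foldl (pvBody adj groups g prev i t) st)).1.count false ≤ st.1.count false := by
      intro js
      induction js with
      | nil => intro st; simp
      | cons j rest ihr =>
        intro st
        simp only [List.foldl_cons]
        refine le_trans (ihr _) ?_
        unfold pvBody
        by_cases hc : j ≠ prev ∧ PySem.List.pyGet? st.1 j = some false
        · rw [if_pos hc]
          exact ih i j (1 - t) st.1
        · rw [if_neg hc]
    exact le_trans (haux _ _) (pv_countFalse_pySetD_le vis i)

-- Simulation: running Source B's machine with a frame mid-way through its neighbour list equals
-- finishing A's neighbour loop on the remaining list and folding the totals into the parent.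
theorem pv_sim (adj groups : List (List Int)) :
    ∀ (g : Nat) (js : List Int) (prev i t : Int) (vis : List Bool) (a o : Int)
      (S : List (Int × Int × Int × List Int × Int × Int)),
      vis.count false ≤ g →
      runB adj groups vis ((prev, i, t, js, a, o) :: S) =
        (let st := js.foldl (pvBody adj groups g prev i t) (vis, a, o)
         pvFinish adj groups st.1 st.2.1 st.2.2 S) := by
  intro g
  induction g with
  | zero =>
    intro js
    induction js with
    | nil =>
      intro prev i t vis a o S _
      cases S with
      | nil => simp [runB, pvFinish]
      | cons fr S' => obtain ⟨pp, pn, pt, pjs, pa, po⟩ := fr; simp [runB, pvFinish]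
    | cons j rest ihr =>
      intro prev i t vis a o S h0
      by_cases hc : j ≠ prev ∧ PySem.List.pyGet? vis j = some false
      · exact absurd (pv_one_le_countFalse vis j hc.2) (by omega)
      · rw [runB]
        rw [dif_neg hc]
        simp only [List.foldl_cons]
        have hb : pvBody adj groups 0 prev i t (vis, a, o) j = (vis, a, o) := by
          unfold pvBody; rw [if_neg hc]
        rw [hb]
        exact ihr prev i t vis a o S h0
  | succ g ih =>
    intro js
    induction js with
    | nil =>
      intro prev i t vis a o S _
      cases S with
      | nil => simp [runB, pvFinish]
      | cons fr S' => obtain ⟨pp, pn, pt, pjs, pa, po⟩ := fr; simp [runB, pvFinish]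
    | cons j rest ihr =>
      intro prev i t vis a o S h
      by_cases hc : j ≠ prev ∧ PySem.List.pyGet? vis j = some false
      · -- child step
        have h1 : 1 ≤ vis.count false := pv_one_le_countFalse vis j hc.2
        have hset : (PySem.List.pySetD vis j true).count false < vis.count false :=
          pv_countFalse_pySetD_lt vis j hc.2
        rw [runB]
        rw [dif_pos hc]
        rw [ih ((PySem.List.pyGet? adj j).getD []) i j (1 - t)
            (PySem.List.pySetD vis j true) _ _ ((prev, i, t, rest, a, o) :: S) (by omega)]
        set r := dfsA adj groups (g + 1) i j (1 - t) vis with hr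
        have hst : ((PySem.List.pyGet? adj j).getD []).foldl (pvBody adj groups g i j (1 - t))
            (PySem.List.pySetD vis j true,
             (((PySem.List.pyGet? groups j).getD []).length : Int),
             (1 - t) * (((PySem.List.pyGet? groups j).getD []).length : Int)) = r := by
          rw [hr, dfsA_succ]
        simp only [hst]
        rw [pvFinish]
        have hrcount : r.1.count false ≤ g + 1 := by
          have := dfsA_count_le adj groups (g + 1) i j (1 - t) vis
          rw [← hr] at this
          omega
        rw [ihr prev i t r.1 (a + r.2.1) (o + r.2.2) S hrcount]
        simp only [List.foldl_cons]
        have hb : pvBody adj groups (g + 1) prev i t (vis, a, o) j = (r.1, a + r.2.1, o + r.2.2) := by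
          unfold pvBody; rw [if_pos hc]
        rw [hb]
      · rw [runB]
        rw [dif_neg hc]
        simp only [List.foldl_cons]
        have hb : pvBody adj groups (g + 1) prev i t (vis, a, o) j = (vis, a, o) := by
          unfold pvBody; rw [if_neg hc]
        rw [hb]
        exact ihr prev i t vis a o S h

-- ===== VERDICT (by name: the statement is the Claim_ definition above) =====
theorem dfs_spec : Claim_equal_dfs := by
  unfold Claim_equal_dfs
  intro prev i toggle visited adj groups _ _
  unfold Spec_dfs dfs dfs_alt
  have hcount : (PySem.List.pySetD visited i true).count false ≤ visited.length + 1 := by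
    have h1 := pv_countFalse_pySetD_le visited i
    have h2 := List.count_le_length (l := visited) (a := false)
    omega
  rw [pv_sim adj groups (visited.length + 1) ((PySem.List.pyGet? adj i).getD []) prev i toggle
      (PySem.List.pySetD visited i true) _ _ [] hcount]
  have : dfsA adj groups (visited.length + 2) prev i toggle visited =
      ((PySem.List.pyGet? adj i).getD []).foldl
        (pvBody adj groups (visited.length + 1) prev i toggle)
        (PySem.List.pySetD visited i true,
         (((PySem.List.pyGet? groups i).getD []).length : Int),
         toggle * (((PySem.List.pyGet? groups i).getD []).length : Int)) :=
    dfsA_succ adj groups (visited.length + 1) prev i toggle visited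
  rw [this]
  rfl
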